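-- pv_equiv track=rewrite | github.com/t1sk3/Small-Projects | binair en zo/tellen.py | dectobcd
-- ===== SOURCE A (Python) =====
-- def dectobin(number):
--     number = int(number)
--     two = 1
--     iteration = 0
--     newlst = []
--     while two <= int(number):
--         two = two*2
--         iteration += 1
--     iteration += -1
--     multiplier = 2**iteration
--     for i in range (0, iteration + 1):
--         if int(number) >= multiplier:
--             newlst.append('1')
--             number = number - multiplier
--         else:
--             newlst.append('0')
--         if multiplier != 1:
--             multiplier = multiplier/2
--         elif multiplier == 1:
--             multiplier = 0
--     bina = ''.join(str(d) for d in newlst)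
--     try:
--         bina = int(bina)
--         return bina
--     except:
--         return bina
--
-- def dectobcd(onumber):
--     nums = []
--     newnum = ''
--     onumber = str(onumber).strip(' ')
--     for number in onumber:
--         nums.append(number)
--     for number in nums:
--         adding = True
--         addnum = str(dectobin(int(number)))
--         while adding:
--             if len(addnum.strip()) < 4:
--                 addnum = '0' + addnum
--             else:
--                 adding = False
--         newnum = newnum + ' ' + str(addnum)
--     return newnum
-- ===== SOURCE B (Python) =====
-- def dectobcd(onumber):
--     return ''.join(' ' + format(int(ch), '04b') for ch in str(onumber).strip(' '))
-- ===== Notes on version B (the rewrite author's own statement) =====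
-- stated objective: simpler
-- what changed: Replaces A's hand-rolled doubling/subtraction binary-conversion helper (dectobin) and its separate while-loop zero-padding with a one-line closed-form per-digit formatting format(int(ch), '04b') joined over the digits.
import Mathlib
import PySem

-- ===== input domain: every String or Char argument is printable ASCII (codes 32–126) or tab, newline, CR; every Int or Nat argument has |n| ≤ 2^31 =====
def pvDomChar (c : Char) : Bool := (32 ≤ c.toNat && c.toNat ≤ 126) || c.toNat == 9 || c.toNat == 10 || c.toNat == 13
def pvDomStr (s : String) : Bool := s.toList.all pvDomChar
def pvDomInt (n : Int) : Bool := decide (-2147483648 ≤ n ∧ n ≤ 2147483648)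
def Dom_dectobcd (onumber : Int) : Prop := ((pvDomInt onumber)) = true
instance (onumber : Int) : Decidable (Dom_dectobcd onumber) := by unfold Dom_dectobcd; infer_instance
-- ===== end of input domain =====

-- B replaces A's hand-rolled doubling/subtraction binary conversion and its padding loop by the
-- closed-form per-digit formatting format(int(ch), '04b'); objective: simpler.

-- ===== PORT A =====
-- 'while two <= int(number): two = two*2; iteration += 1' — fuel number.toNat + 1 is never
-- exhausted: two doubles starting from 1, so the loop runs at most log2(number)+1 ≤ number.toNat times
def dectobinWhile : Nat → Int → Int → Int → Int × Int
  | 0, _, two, iteration => (two, iteration)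
  | f+1, number, two, iteration =>
    if two ≤ number then dectobinWhile f number (two*2) (iteration+1) else (two, iteration)

-- dectobin; this port returns str(dectobin(number)) — A's only caller applies str() immediately,
-- and the try/except int(bina) round-trip is the match on PySem.Int.ofChars? below
def dectobin (number : Int) : List Char :=
  let wi := dectobinWhile (number.toNat + 1) number 1 0
  let iteration := wi.2 + (-1)
  -- Python's 2**iteration is the float 0.5 when iteration = -1; the loop below is then empty, so it is never read
  let multiplier : Int := if 0 ≤ iteration then 2 ^ iteration.toNat else 0
  let st := (PySem.List.pyRange 0 (iteration + 1) 1).foldl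
    (fun (s : Int × Int × List Char) _ =>
      let s2 : Int × Int × List Char :=
        if s.2.1 ≤ s.1 then (s.1 - s.2.1, s.2.1, s.2.2 ++ ['1'])
        else (s.1, s.2.1, s.2.2 ++ ['0'])
      -- 'multiplier = multiplier/2' is float division, exact here: multiplier is a power of two > 1 on that branch
      (s2.1, if s2.2.1 ≠ 1 then PySem.Int.floordiv s2.2.1 2 else 0, s2.2.2))
    (number, multiplier, ([] : List Char))
  -- bina = ''.join(newlst) is newlst itself (all elements are single chars)
  match PySem.Int.ofChars? st.2.2 with
  | some v => PySem.Int.toChars v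
  | none => st.2.2

-- 'while adding: if len(addnum.strip()) < 4: addnum = '0' + addnum else: adding = False' —
-- each prepended '0' grows len(addnum.strip()) by at least one, so at most 4 iterations ever run
def padLoopA : Nat → List Char → List Char
  | 0, addnum => addnum
  | f+1, addnum =>
    if (PySem.Chars.strip addnum).length < 4 then padLoopA f ('0' :: addnum) else addnum

-- the body of A's second for-loop for one character (what gets appended to newnum)
def pieceA (c : Char) : List Char :=
  match PySem.Int.ofChars? [c] with
  | some d => ' ' :: padLoopA 4 (dectobin d)
  | none => []   -- int(number) raises ValueError here; such inputs are outside Pre_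

def dectobcd (onumber : Int) : String :=
  let onum := PySem.Chars.stripChars (PySem.Int.toChars onumber) [' ']
  let nums := onum.foldl (fun acc c => acc ++ [c]) ([] : List Char)
  String.mk (nums.foldl (fun acc c => acc ++ pieceA c) [])

-- ===== PORT B =====
-- ' ' + format(int(ch), '04b') : format(d, '04b') is d's binary form zero-filled to width 4
def pieceB (c : Char) : List Char :=
  match PySem.Int.ofChars? [c] with
  | some d => ' ' :: PySem.Chars.zfill (PySem.Int.toBinChars d) 4
  | none => []   -- int(ch) raises ValueError here; such inputs are outside Pre_

def dectobcd_alt (onumber : Int) : String :=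
  String.mk ((PySem.Chars.stripChars (PySem.Int.toChars onumber) [' ']).flatMap pieceB)

-- ===== PRECONDITION & SPEC =====
-- Pre_ excludes exactly the negative inputs: there str(onumber) starts with '-' and both A and B
-- raise ValueError at int('-')
def Pre_dectobcd (onumber : Int) : Prop := 0 ≤ onumber
instance (onumber : Int) : Decidable (Pre_dectobcd onumber) := by unfold Pre_dectobcd; infer_instance
def pvWitness_dectobcd : Int := (102)

def Spec_dectobcd (onumber : Int) (out : String) : Prop := out = dectobcd_alt onumber
instance (onumber : Int) (out : String) : Decidable (Spec_dectobcd onumber out) := by unfold Spec_dectobcd; infer_instance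

-- ===== CLAIM (what is proved, stated in full; the proofs are below) =====
def Claim_equal_dectobcd : Prop := ∀ (onumber : Int), Dom_dectobcd onumber → Pre_dectobcd onumber → Spec_dectobcd onumber (dectobcd onumber)

-- ===== LEMMAS AND PROOFS =====

def pvDigits : List Char := ['0','1','2','3','4','5','6','7','8','9']

theorem digitChar_mem_pvDigits (m : Nat) (h : m < 10) : Nat.digitChar m ∈ pvDigits := by
  interval_cases m <;> decide

theorem toDigitsCore_mem_pvDigits : ∀ (f n : Nat) (ds : List Char),
    (∀ c ∈ ds, c ∈ pvDigits) → ∀ c ∈ Nat.toDigitsCore 10 f n ds, c ∈ pvDigits := by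
  intro f
  induction f with
  | zero => intro n ds hds c hc; exact hds c hc
  | succ f ih =>
    intro n ds hds c hc
    rw [Nat.toDigitsCore] at hc
    split at hc
    · rcases List.mem_cons.1 hc with h | h
      · exact h ▸ digitChar_mem_pvDigits _ (Nat.mod_lt _ (by omega))
      · exact hds c h
    · exact ih _ _ (by
        intro c' hc'
        rcases List.mem_cons.1 hc' with h | h
        · exact h ▸ digitChar_mem_pvDigits _ (Nat.mod_lt _ (by omega))
        · exact hds c' h) c hc

theorem toDigits_mem_pvDigits (n : Nat) : ∀ c ∈ Nat.toDigits 10 n, c ∈ pvDigits := by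
  intro c hc
  exact toDigitsCore_mem_pvDigits _ _ [] (by simp) c hc

theorem mem_of_mem_stripChars {c : Char} {s chars : List Char}
    (h : c ∈ PySem.Chars.stripChars s chars) : c ∈ s := by
  unfold PySem.Chars.stripChars at h
  rw [List.mem_reverse] at h
  have h2 := (List.dropWhile_sublist _).subset h
  rw [List.mem_reverse] at h2
  exact (List.dropWhile_sublist _).subset h2

theorem pieceA_eq_pieceB (c : Char) (hc : c ∈ pvDigits) : pieceA c = pieceB c := by
  fin_cases hc <;> decide

theorem dectobcd_spec : Claim_equal_dectobcd := by
  intro n _ hpre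
  simp only [Spec_dectobcd, dectobcd, dectobcd_alt]
  rw [PySem.List.foldl_append_singleton_eq_self, PySem.List.foldl_append_eq_flatMap,
    List.nil_append, List.nil_append]
  refine congrArg String.mk ?_
  rw [List.flatMap_def, List.flatMap_def]
  refine congrArg List.flatten ?_
  apply List.map_congr_left
  intro c hc
  apply pieceA_eq_pieceB
  have hmem : c ∈ PySem.Int.toChars n := mem_of_mem_stripChars hc
  unfold PySem.Int.toChars at hmem
  rw [if_neg (by unfold Pre_dectobcd at hpre; omega)] at hmem
  exact toDigits_mem_pvDigits _ c hmem
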